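-- pv_equiv track=rewrite | github.com/osquitar19/Semanarios_Desktop | logica_programas.py | aplicar_abreviaciones
-- ===== SOURCE A (Python) =====
-- def aplicar_abreviaciones(texto):
--     ABREVIACIONES = {
--         # Aquí se pueden definir abreviaciones específicas para programas
--         "metros": "m.",
--         "kilogramos": "kg.",
--         ",": " , "
--     }
--     for clave in sorted(ABREVIACIONES, key=len, reverse=True):
--         texto = texto.replace(clave, ABREVIACIONES[clave])
--     return texto
-- ===== SOURCE B (Python) =====
-- def aplicar_abreviaciones(texto):
--     ABREVIACIONES = {
--         "metros": "m.",
--         "kilogramos": "kg.",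
--         ",": " , "
--     }
--     # one single left-to-right pass, trying keys longest-first at each position
--     reemplazos = sorted(ABREVIACIONES.items(), key=lambda kv: len(kv[0]), reverse=True)
--     out = []
--     i = 0
--     n = len(texto)
--     while i < n:
--         for clave, valor in reemplazos:
--             if texto.startswith(clave, i):
--                 out.append(valor)
--                 i += len(clave)
--                 break
--         else:
--             out.append(texto[i])
--             i += 1
--     return ''.join(out)
-- ===== Notes on version B (the rewrite author's own statement) =====
-- stated objective: alternative
-- what changed: Replaces three sequential full-string str.replace passes by one left-to-right scan that at each position tries the keys longest-first and emits the replacement or the character, building the output once.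
import Mathlib
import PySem

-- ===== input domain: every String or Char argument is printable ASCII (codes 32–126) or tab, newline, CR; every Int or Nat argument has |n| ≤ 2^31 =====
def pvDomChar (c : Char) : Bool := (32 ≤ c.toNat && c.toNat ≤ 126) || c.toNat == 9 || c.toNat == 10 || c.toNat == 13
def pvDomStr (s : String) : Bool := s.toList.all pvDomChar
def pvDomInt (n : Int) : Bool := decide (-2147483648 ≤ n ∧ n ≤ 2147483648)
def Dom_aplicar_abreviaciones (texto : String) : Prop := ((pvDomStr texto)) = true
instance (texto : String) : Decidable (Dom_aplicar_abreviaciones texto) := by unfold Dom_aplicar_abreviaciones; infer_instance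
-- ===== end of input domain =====

-- B replaces A's three sequential str.replace passes by one left-to-right scan trying keys longest-first; same return value.

-- ===== PORT A =====
-- the dict literal and the loop 'for clave in sorted(ABREVIACIONES, key=len, reverse=True): texto = texto.replace(clave, ABREVIACIONES[clave])'
-- (ABREVIACIONES[clave] never misses — clave ranges over the dict's own keys — so getD with dummy default "" is exact)
def aplicar_abreviaciones (texto : String) : String :=
  let abrev : PySem.Dict String String :=
    PySem.Dict.mk [("metros", "m."), ("kilogramos", "kg."), (",", " , ")]
  (PySem.List.sorted abrev.keys (fun k => (PySem.Str.len k : Int)) true).foldl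
    (fun t clave => PySem.Str.replace t clave (abrev.getD clave "")) texto

-- ===== PORT B =====
-- Source B's while-loop: at each position try the keys longest-first ("kilogramos", "metros", ","),
-- emit the replacement and skip the key, otherwise copy one character (the inner for-loop over
-- the three (clave, valor) pairs is unrolled into the three ifs, in the same order)
def pvBGo : List Char → List Char
  | [] => []
  | c :: t =>
    if ("kilogramos".toList).isPrefixOf (c :: t) then "kg.".toList ++ pvBGo (t.drop 9)
    else if ("metros".toList).isPrefixOf (c :: t) then "m.".toList ++ pvBGo (t.drop 5)
    else if c = ',' then ' ' :: ',' :: ' ' :: pvBGo t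
    else c :: pvBGo t
termination_by l => l.length
decreasing_by
  all_goals simp

def aplicar_abreviaciones_alt (texto : String) : String :=
  String.ofList (pvBGo texto.toList)

-- ===== PRECONDITION & SPEC =====
def Spec_aplicar_abreviaciones (texto : String) (out : String) : Prop := out = aplicar_abreviaciones_alt texto
instance (texto : String) (out : String) : Decidable (Spec_aplicar_abreviaciones texto out) := by unfold Spec_aplicar_abreviaciones; infer_instance

-- ===== CLAIM (what is proved, stated in full; the proofs are below) =====
def Claim_equal_aplicar_abreviaciones : Prop := ∀ (texto : String), Dom_aplicar_abreviaciones texto → Spec_aplicar_abreviaciones texto (aplicar_abreviaciones texto)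

-- ===== LEMMAS AND PROOFS =====

-- clean structural recursion equivalent to PySem.Chars.replace for a nonempty pattern
def replC (old new : List Char) : List Char → List Char
  | [] => []
  | c :: t =>
    if old.isPrefixOf (c :: t) then new ++ replC old new (t.drop (old.length - 1))
    else c :: replC old new t
termination_by l => l.length
decreasing_by
  all_goals simp

theorem replC_eq_go (old new : List Char) (h : old ≠ []) :
    ∀ fuel l acc, l.length ≤ fuel →
      PySem.Chars.replace.go old new fuel l acc = acc.reverse ++ replC old new l := by
  intro fuel
  induction fuel with
  | zero =>
    intro l acc hl
    have hnil : l = [] := List.length_eq_zero_iff.mp (Nat.le_zero.mp hl)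
    subst hnil
    simp [PySem.Chars.replace.go, replC]
  | succ n ih =>
    intro l acc hl
    match l with
    | [] => simp [PySem.Chars.replace.go, replC]
    | c :: t =>
      rw [PySem.Chars.replace.go]
      by_cases hp : old.isPrefixOf (c :: t)
      · simp only [hp, if_true]
        have hlen : old.length ≤ (c :: t).length :=
          List.IsPrefix.length_le (List.isPrefixOf_iff_prefix.mp hp)
        have hpos : 1 ≤ old.length := by
          cases old with
          | nil => exact absurd rfl h
          | cons a b => simp
        have hdrop : (List.drop old.length (c :: t)).length ≤ n := by
          simp at hl ⊢; omega
        rw [ih _ _ hdrop, replC]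
        simp only [hp, if_true]
        have hd : List.drop old.length (c :: t) = t.drop (old.length - 1) := by
          cases old with
          | nil => exact absurd rfl h
          | cons a b => simp
        rw [hd]; simp
      · simp only [hp]
        have ht : t.length ≤ n := by simp at hl; omega
        rw [ih _ _ ht, replC]
        simp [hp]

theorem replace_eq_replC (s old new : List Char) (h : old ≠ []) :
    PySem.Chars.replace s old new = replC old new s := by
  rw [PySem.Chars.replace]
  have he : old.isEmpty = false := by cases old with | nil => exact absurd rfl h | cons a b => rfl
  rw [he]
  simpa using replC_eq_go old new h s.length s [] le_rfl

-- replacing "kilogramos" by "kg." never creates or destroys a prefix that contains no 'k'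
theorem pref_R1 (p : List Char) (hk : 'k' ∉ p) :
    ∀ x, p.isPrefixOf (replC "kilogramos".toList "kg.".toList x) = p.isPrefixOf x := by
  induction p with
  | nil => intro x; simp [List.isPrefixOf]
  | cons a p' ih =>
    intro x
    have ha : a ≠ 'k' := by intro h; exact hk (h ▸ List.mem_cons_self)
    have hk' : 'k' ∉ p' := fun h => hk (List.mem_cons_of_mem _ h)
    match x with
    | [] => simp [replC]
    | c :: t =>
      rw [replC]
      by_cases hp : ("kilogramos".toList).isPrefixOf (c :: t)
      · simp only [hp, if_true]
        have h2 := hp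
        rw [show ("kilogramos".toList) = 'k' :: "ilogramos".toList from rfl,
            List.isPrefixOf_cons₂, Bool.and_eq_true, beq_iff_eq] at h2
        have hc : c = 'k' := h2.1.symm
        subst hc
        have haf : (a == 'k') = false := beq_eq_false_iff_ne.mpr ha
        simp [List.isPrefixOf_cons₂, haf]
      · rw [if_neg hp]
        simp only [List.isPrefixOf_cons₂, ih hk']

-- the heart: the three sequential passes of A equal the one longest-first pass of B
theorem chain_eq_pvBGo (l : List Char) :
    replC ",".toList " , ".toList (replC "metros".toList "m.".toList
      (replC "kilogramos".toList "kg.".toList l)) = pvBGo l := by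
  induction l using pvBGo.induct with
  | case1 => simp [replC, pvBGo]
  | case2 c t h ih =>
    obtain ⟨hc, hrest⟩ : 'k' = c ∧ "ilogramos".toList <+: t := by
      have h' := List.isPrefixOf_iff_prefix.mp h
      rwa [show ("kilogramos".toList) = 'k' :: "ilogramos".toList from rfl,
        List.cons_prefix_cons] at h'
    subst hc
    rw [replC]
    simp only [h, if_true]
    simp [replC, pvBGo]
    rw [if_pos (by simpa using hrest)]
    simpa using ih
  | case3 c t h1 h2 ih =>
    obtain ⟨u, hu⟩ := List.isPrefixOf_iff_prefix.mp h2
    obtain ⟨hc, ht⟩ := List.cons_eq_cons.mp (by simpa using hu)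
    subst hc; subst ht
    simp [replC, pvBGo]
    simpa using ih
  | case4 t h1 h2 ih =>
    simp [replC, pvBGo]
    simpa using ih
  | case5 c t h1 h2 h3 ih =>
    have hR1 : replC "kilogramos".toList "kg.".toList (c::t)
        = c :: replC "kilogramos".toList "kg.".toList t := by
      rw [replC, if_neg h1]
    have hm : ("metros".toList).isPrefixOf (c :: replC "kilogramos".toList "kg.".toList t) = false := by
      rw [← hR1, pref_R1 _ (by decide)]
      cases hx : ("metros".toList).isPrefixOf (c :: t) <;> simp_all
    have hR2 : replC "metros".toList "m.".toList (c :: replC "kilogramos".toList "kg.".toList t)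
        = c :: replC "metros".toList "m.".toList (replC "kilogramos".toList "kg.".toList t) := by
      rw [replC, if_neg (by rw [hm]; exact Bool.false_ne_true)]
    have hR3 : replC ",".toList " , ".toList
        (c :: replC "metros".toList "m.".toList (replC "kilogramos".toList "kg.".toList t))
        = c :: replC ",".toList " , ".toList
            (replC "metros".toList "m.".toList (replC "kilogramos".toList "kg.".toList t)) := by
      rw [replC, if_neg (by simp [List.isPrefixOf_cons₂, Ne.symm h3])]
    rw [hR1, hR2, hR3, ih, pvBGo]
    simp only [h1, h2, h3, if_false, Bool.false_eq_true]

-- A's fold over the sorted keys is definitionally the three replaces, longest key first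
theorem aplicar_eq_three (texto : String) : aplicar_abreviaciones texto =
    PySem.Str.replace (PySem.Str.replace (PySem.Str.replace texto "kilogramos" "kg.")
      "metros" "m.") "," " , " := rfl

-- ===== VERDICT (by name: the statement is the Claim_ definition above) =====
theorem aplicar_abreviaciones_spec : Claim_equal_aplicar_abreviaciones := by
  unfold Claim_equal_aplicar_abreviaciones
  intro texto _
  unfold Spec_aplicar_abreviaciones aplicar_abreviaciones_alt
  rw [aplicar_eq_three]
  have hlist : (PySem.Str.replace (PySem.Str.replace (PySem.Str.replace texto "kilogramos" "kg.")
      "metros" "m.") "," " , ").toList = pvBGo texto.toList := by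
    simp only [PySem.Str.toList_replace]
    rw [replace_eq_replC _ _ _ (by decide), replace_eq_replC _ _ _ (by decide),
        replace_eq_replC _ _ _ (by decide)]
    exact chain_eq_pvBGo texto.toList
  calc PySem.Str.replace (PySem.Str.replace (PySem.Str.replace texto "kilogramos" "kg.")
          "metros" "m.") "," " , "
      = String.ofList (PySem.Str.replace (PySem.Str.replace (PySem.Str.replace texto "kilogramos" "kg.")
          "metros" "m.") "," " , ").toList := Eq.symm String.ofList_toList
    _ = String.ofList (pvBGo texto.toList) := by rw [hlist]
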